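-- pv_equiv track=rewrite | github.com/Andrem19/ORC_1 | app/execution_parsing.py | _find_redundant_closer_before_extra
-- ===== SOURCE A (Python) =====
-- def _find_redundant_closer_before_extra(raw: str, extra_pos: int) -> int | None:
--     index = min(max(extra_pos - 1, 0), len(raw) - 1)
--     while index >= 0 and raw[index].isspace():
--         index -= 1
--     if index < 0:
--         return None
--     if raw[index] == ",":
--         index -= 1
--         while index >= 0 and raw[index].isspace():
--             index -= 1
--     if index < 0 or raw[index] not in "}]":
--         return None
--     return index
-- ===== SOURCE B (Python) =====
-- def _find_redundant_closer_before_extra(raw: str, extra_pos: int) -> int | None: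
--     start = min(max(extra_pos - 1, 0), len(raw) - 1)
--     if start < 0:
--         return None
--     t = raw[:start + 1].rstrip()
--     if not t:
--         return None
--     if t[-1] == ',':
--         t = t[:-1].rstrip()
--     if not t or t[-1] not in "}]":
--         return None
--     return len(t) - 1
-- ===== Notes on version B (the rewrite author's own statement) =====
-- stated objective: simpler
-- what changed: A's two hand-written backward index loops that skip whitespace are replaced by taking the clamped prefix raw[:start+1] and using str.rstrip (twice, after optionally removing a trailing comma), returning len(t)-1.
import Mathlib
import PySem

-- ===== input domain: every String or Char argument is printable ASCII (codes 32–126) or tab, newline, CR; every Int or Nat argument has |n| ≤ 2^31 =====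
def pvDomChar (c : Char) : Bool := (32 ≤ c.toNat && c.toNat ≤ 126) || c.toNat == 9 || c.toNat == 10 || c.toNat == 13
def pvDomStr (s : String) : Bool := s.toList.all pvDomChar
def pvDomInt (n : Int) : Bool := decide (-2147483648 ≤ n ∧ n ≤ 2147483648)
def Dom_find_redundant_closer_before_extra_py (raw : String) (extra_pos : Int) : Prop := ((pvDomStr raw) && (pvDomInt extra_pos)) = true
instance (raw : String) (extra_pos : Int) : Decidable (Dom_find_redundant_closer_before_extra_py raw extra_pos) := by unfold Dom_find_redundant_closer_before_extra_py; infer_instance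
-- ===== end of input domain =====

-- B replaces A's two hand-written backward whitespace-skipping index loops by rstrip on the
-- clamped prefix (objective: simpler; same cost).

-- ===== PORT A =====
-- A's 'while index >= 0 and raw[index].isspace(): index -= 1' loop
def pySkipWS (cs : List Char) (index : Int) : Int :=
  if h : 0 ≤ index ∧ PySem.Chars.isspace (PySem.List.pyGetD cs index ' ') = true then
    pySkipWS cs (index - 1)
  else index
termination_by (index + 1).toNat
decreasing_by omega

def find_redundant_closer_before_extra_py (raw : String) (extra_pos : Int) : Option Int :=
  let cs := raw.toList
  let index0 := min (max (extra_pos - 1) 0) ((cs.length : Int) - 1)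
  let index1 := pySkipWS cs index0
  if index1 < 0 then none
  else
    let index2 := if PySem.List.pyGetD cs index1 ' ' = ',' then pySkipWS cs (index1 - 1) else index1
    if index2 < 0 ∨ ¬ (PySem.List.pyGetD cs index2 ' ' = '}' ∨ PySem.List.pyGetD cs index2 ' ' = ']') then
      none
    else some index2

-- ===== PORT B =====
def find_redundant_closer_before_extra_py_alt (raw : String) (extra_pos : Int) : Option Int :=
  let cs := raw.toList
  let start := min (max (extra_pos - 1) 0) ((cs.length : Int) - 1)
  if start < 0 then none
  else
    let t := PySem.Chars.rstrip (PySem.List.slice cs none (some (start + 1)))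
    if t = [] then none
    else
      let t2 := if PySem.List.pyGet? t (-1) = some ',' then PySem.Chars.rstrip t.dropLast else t
      match PySem.List.pyGet? t2 (-1) with
      | none => none
      | some c => if c = '}' ∨ c = ']' then some ((t2.length : Int) - 1) else none

-- ===== PRECONDITION & SPEC =====
def Spec_find_redundant_closer_before_extra_py (raw : String) (extra_pos : Int) (out : Option Int) : Prop := out = find_redundant_closer_before_extra_py_alt raw extra_pos
instance (raw : String) (extra_pos : Int) (out : Option Int) : Decidable (Spec_find_redundant_closer_before_extra_py raw extra_pos out) := by unfold Spec_find_redundant_closer_before_extra_py; infer_instance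

-- ===== CLAIM (what is proved, stated in full; the proofs are below) =====
def Claim_equal_find_redundant_closer_before_extra_py : Prop := ∀ (raw : String) (extra_pos : Int), Dom_find_redundant_closer_before_extra_py raw extra_pos → Spec_find_redundant_closer_before_extra_py raw extra_pos (find_redundant_closer_before_extra_py raw extra_pos)

-- ===== LEMMAS AND PROOFS =====

-- rstrip of a snoc: the trailing character is stripped iff it is whitespace
theorem rstrip_snoc (p : List Char) (c : Char) :
    PySem.Chars.rstrip (p ++ [c]) =
      if PySem.Chars.isspace c then PySem.Chars.rstrip p else p ++ [c] := by
  simp [PySem.Chars.rstrip, List.dropWhile_cons]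
  split_ifs <;> simp_all

-- A's whitespace-skip loop over a clamped index computes len(rstrip(prefix)) - 1
theorem skip_eq (cs : List Char) (m : Nat) (hm : m ≤ cs.length) :
    pySkipWS cs ((m : Int) - 1) =
      ((PySem.Chars.rstrip (cs.take m)).length : Int) - 1 := by
  induction m with
  | zero =>
    rw [pySkipWS]
    simp [PySem.Chars.rstrip]
  | succ k ih =>
    have hk : k < cs.length := by omega
    have harg : ((k + 1 : Nat) : Int) - 1 = (k : Int) := by push_cast; ring
    rw [harg, pySkipWS]
    have hget : PySem.List.pyGetD cs (k : Int) ' ' = cs[k] := by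
      rw [PySem.List.pyGetD_natCast]
      exact List.getD_eq_getElem _ _ hk
    have htake : cs.take (k + 1) = cs.take k ++ [cs[k]] := by
      rw [List.take_add_one]
      simp [List.getElem?_eq_getElem hk]
    rw [htake, rstrip_snoc]
    by_cases hsp : PySem.Chars.isspace cs[k] = true
    · have hc : (0 ≤ (k:Int) ∧ PySem.Chars.isspace (PySem.List.pyGetD cs (k:Int) ' ') = true) :=
        ⟨Int.natCast_nonneg k, by rw [hget]; exact hsp⟩
      rw [dif_pos hc, if_pos hsp]
      simpa using ih (by omega)
    · have hc : ¬(0 ≤ (k:Int) ∧ PySem.Chars.isspace (PySem.List.pyGetD cs (k:Int) ' ') = true) := by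
        rw [hget]; tauto
      rw [dif_neg hc, if_neg hsp]
      simp
      omega

-- rstrip yields a prefix of its argument
theorem rstrip_prefix (p : List Char) : PySem.Chars.rstrip p <+: p := by
  have h : List.dropWhile PySem.Chars.isspace p.reverse <:+ p.reverse :=
    List.dropWhile_suffix _
  have := List.reverse_prefix.mpr h
  simpa [PySem.Chars.rstrip] using this

-- indexing cs at len(t)-1 for a nonempty prefix t of cs gives t's last character
theorem pref_getD (t cs : List Char) (h : t <+: cs) (ht : t ≠ []) :
    PySem.List.pyGetD cs ((t.length : Int) - 1) ' ' = t.getLast ht := by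
  obtain ⟨r, rfl⟩ := h
  have h1 : 1 ≤ t.length := List.length_pos_iff.mpr ht
  have hc : ((t.length : Int) - 1) = ((t.length - 1 : Nat) : Int) := by omega
  rw [hc, PySem.List.pyGetD_natCast]
  rw [List.getD_eq_getElem _ _ (by simp; omega)]
  rw [List.getElem_append_left (by omega)]
  exact (List.getLast_eq_getElem ht).symm

-- the final '}]' test of A (indexing into cs) agrees with B's test on t2's last character
theorem finish_eq (cs t2 : List Char) (h : t2 <+: cs) :
    (if ((t2.length : Int) - 1) < 0 ∨
        ¬ (PySem.List.pyGetD cs ((t2.length : Int) - 1) ' ' = '}' ∨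
           PySem.List.pyGetD cs ((t2.length : Int) - 1) ' ' = ']') then
       (none : Option Int)
     else some ((t2.length : Int) - 1)) =
    (match PySem.List.pyGet? t2 (-1) with
     | none => (none : Option Int)
     | some c => if c = '}' ∨ c = ']' then some ((t2.length : Int) - 1) else none) := by
  by_cases ht : t2 = []
  · subst ht
    simp [PySem.List.pyGet?]
  · have hg := pref_getD t2 cs h ht
    rw [PySem.List.pyGet?_neg_one, List.getLast?_eq_getLast ht]
    rw [hg]
    have h1 : 1 ≤ t2.length := List.length_pos_iff.mpr ht
    have hge : ¬ ((t2.length : Int) - 1 < 0) := by omega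
    simp only [hge, false_or]
    by_cases hbr : t2.getLast ht = '}' ∨ t2.getLast ht = ']'
    · rw [if_neg (not_not_intro hbr)]
      simp [hbr]
    · rw [if_pos hbr]
      simp [hbr]

theorem main_thm (raw : String) (extra_pos : Int) :
    find_redundant_closer_before_extra_py raw extra_pos
      = find_redundant_closer_before_extra_py_alt raw extra_pos := by
  simp only [find_redundant_closer_before_extra_py, find_redundant_closer_before_extra_py_alt]
  set cs := raw.toList with hcs
  set start := min (max (extra_pos - 1) 0) ((cs.length : Int) - 1) with hstart
  by_cases hn : cs.length = 0
  · have hs : start = -1 := by rw [hstart]; omega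
    have hskip : pySkipWS cs (-1) = -1 := by rw [pySkipWS]; simp
    rw [hs, hskip]
    norm_num
  · have h0 : (0:Int) ≤ start := by rw [hstart]; omega
    have h1 : start < (cs.length : Int) := by rw [hstart]; omega
    obtain ⟨m, hm⟩ : ∃ m : Nat, start = (m : Int) := ⟨start.toNat, (Int.toNat_of_nonneg h0).symm⟩
    have hmlt : m < cs.length := by omega
    have hslice : PySem.List.slice cs none (some (start + 1)) = cs.take (m + 1) := by
      rw [hm]
      have : ((m : Int) + 1) = ((m + 1 : Nat) : Int) := by push_cast; ring
      rw [this, PySem.List.slice_to_natCast]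
    set t := PySem.Chars.rstrip (cs.take (m + 1)) with htdef
    have hidx1 : pySkipWS cs start = (t.length : Int) - 1 := by
      rw [hm]
      have harg : (m : Int) = ((m + 1 : Nat) : Int) - 1 := by push_cast; ring
      rw [harg, htdef]
      exact skip_eq cs (m + 1) (by omega)
    rw [hidx1, hslice, if_neg (show ¬ start < 0 by omega)]
    by_cases ht0 : t = []
    · rw [if_pos ht0]
      have hlen0 : (t.length : Int) - 1 = -1 := by rw [ht0]; simp
      rw [hlen0]
      norm_num
    · rw [if_neg ht0]
      have htl : 1 ≤ t.length := List.length_pos_iff.mpr ht0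
      have hpre : t <+: cs := (rstrip_prefix _).trans (List.take_prefix _ _)
      rw [if_neg (show ¬ ((t.length : Int) - 1 < 0) by omega)]
      have hlastA : PySem.List.pyGetD cs ((t.length : Int) - 1) ' ' = t.getLast ht0 :=
        pref_getD t cs hpre ht0
      have hlastB : PySem.List.pyGet? t (-1) = some (t.getLast ht0) := by
        rw [PySem.List.pyGet?_neg_one]; exact List.getLast?_eq_getLast ht0
      rw [hlastA, hlastB]
      by_cases hcomma : t.getLast ht0 = ','
      · rw [if_pos hcomma, if_pos (show some (t.getLast ht0) = some ',' by rw [hcomma])]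
        have harg : (t.length : Int) - 1 - 1 = ((t.length - 1 : Nat) : Int) - 1 := by omega
        have hskip2 : pySkipWS cs ((t.length : Int) - 1 - 1)
            = ((PySem.Chars.rstrip (cs.take (t.length - 1))).length : Int) - 1 := by
          rw [harg]
          exact skip_eq cs (t.length - 1) (by have := hpre.length_le; omega)
        have hdrop : cs.take (t.length - 1) = t.dropLast := by
          obtain ⟨r, hr⟩ := hpre
          rw [← hr, List.take_append_of_le_length (by omega), List.dropLast_eq_take]
        rw [hskip2, hdrop]
        have hpre2 : PySem.Chars.rstrip t.dropLast <+: cs :=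
          ((rstrip_prefix _).trans (List.dropLast_prefix t)).trans hpre
        exact finish_eq cs _ hpre2
      · rw [if_neg hcomma, if_neg (show ¬ some (t.getLast ht0) = some ',' by simp [hcomma])]
        exact finish_eq cs t hpre

-- ===== VERDICT (by name: the statement is the Claim_ definition above) =====
theorem find_redundant_closer_before_extra_py_spec : Claim_equal_find_redundant_closer_before_extra_py := by
  intro raw extra_pos _
  unfold Spec_find_redundant_closer_before_extra_py
  exact main_thm raw extra_pos
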